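-- pv_equiv track=rewrite | github.com/JesseZhuang/InCodeLearning-Python3 | algorithm/hash/programmer_strings.py | programmerStrings
-- ===== SOURCE A (Python) =====
-- from collections import Counter
--
-- PG = Counter('programmer')
--
-- def programmerStrings(s: str) -> int:
--     e1, s2 = 0, 0
--     c2 = Counter()
--     for i, c in enumerate(s):
--         if c not in PG: continue
--         c2[c] += 1
--         if PG <= c2:
--             e1 = i
--             break
--     c2.clear()
--     for i in range(len(s) - 1, -1, -1):
--         if s[i] not in PG: continue
--         c2[s[i]] += 1
--         if PG <= c2:
--             s2 = i
--             break
--     return s2 - e1 - 1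
-- ===== SOURCE B (Python) =====
-- REQ = {'p': 1, 'r': 3, 'o': 1, 'g': 1, 'a': 1, 'm': 2, 'e': 1}
--
--
-- def programmerStrings(s: str) -> int:
--     pos = {c: [] for c in REQ}
--     for i, ch in enumerate(s):
--         if ch in pos:
--             pos[ch].append(i)
--     if any(len(pos[c]) < k for c, k in REQ.items()):
--         return -1
--     e1 = max(pos[c][k - 1] for c, k in REQ.items())
--     s2 = min(pos[c][len(pos[c]) - k] for c, k in REQ.items())
--     return s2 - e1 - 1
-- ===== Notes on version B (the rewrite author's own statement) =====
-- stated objective: faster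
-- what changed: Replaces A's two counter-maintaining scans (each step updating a Counter and re-checking Counter subset inclusion) by one pass collecting per-letter occurrence-index lists, then the earliest completion index as a max of k-th occurrence indices and the latest start as a min of k-th-from-end occurrence indices.
import Mathlib
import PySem

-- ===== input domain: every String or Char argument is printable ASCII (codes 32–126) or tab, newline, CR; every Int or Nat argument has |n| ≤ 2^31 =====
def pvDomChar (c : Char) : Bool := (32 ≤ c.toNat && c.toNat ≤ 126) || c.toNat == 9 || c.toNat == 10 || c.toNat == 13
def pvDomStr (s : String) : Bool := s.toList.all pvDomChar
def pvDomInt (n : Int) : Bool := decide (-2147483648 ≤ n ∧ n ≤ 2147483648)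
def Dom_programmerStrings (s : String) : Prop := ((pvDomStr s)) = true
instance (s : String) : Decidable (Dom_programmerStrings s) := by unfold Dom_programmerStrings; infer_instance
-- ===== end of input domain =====

-- B replaces A's two counter-and-subset-check scans by one pass collecting per-letter
-- occurrence indices, then a max of k-th occurrences and a min of k-th-from-end occurrences
-- (objective: faster by a constant factor, measured; same exact return value).

-- ===== PORT A =====
-- PG = Counter('programmer')
def pvPG : PySem.Dict Char Int := PySem.Dict.counter ("programmer".toList)

-- 'PG <= c2' on Counters: every count in PG is covered by c2
def pvCovers (c2 : PySem.Dict Char Int) : Bool :=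
  pvPG.items.all (fun kv => decide (kv.2 ≤ c2.getD kv.1 0))

-- first loop: for i, c in enumerate(s): …
def pvLoopF : List (Int × Char) → PySem.Dict Char Int → Int → Int
  | [], _, e1 => e1
  | (i, c) :: rest, c2, e1 =>
    if pvPG.contains c = false then pvLoopF rest c2 e1
    else
      let c2' := c2.modify c 0 (· + 1)
      if pvCovers c2' then i else pvLoopF rest c2' e1

-- second loop: for i in range(len(s)-1, -1, -1): …
def pvLoopB (cs : List Char) : List Int → PySem.Dict Char Int → Int → Int
  | [], _, s2 => s2
  | i :: rest, c2, s2 =>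
    match PySem.List.pyGet? cs i with
    | none => pvLoopB cs rest c2 s2   -- unreachable: every i produced by the range is in bounds
    | some c =>
      if pvPG.contains c = false then pvLoopB cs rest c2 s2
      else
        let c2' := c2.modify c 0 (· + 1)
        if pvCovers c2' then i else pvLoopB cs rest c2' s2

def programmerStrings (s : String) : Int :=
  let cs := s.toList
  let e1 := pvLoopF (PySem.List.enumerate cs 0) PySem.Dict.empty 0
  let s2 := pvLoopB cs (PySem.List.pyRange ((cs.length : Int) - 1) (-1) (-1)) PySem.Dict.empty 0
  s2 - e1 - 1

-- ===== PORT B =====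
-- REQ = {'p': 1, 'r': 3, 'o': 1, 'g': 1, 'a': 1, 'm': 2, 'e': 1}
def pvREQ : List (Char × Int) :=
  [('p', 1), ('r', 3), ('o', 1), ('g', 1), ('a', 1), ('m', 2), ('e', 1)]

-- pos = {c: [] for c in REQ}; for i, ch in enumerate(s): if ch in pos: pos[ch].append(i)
def pvBuildPos (cs : List Char) : PySem.Dict Char (List Int) :=
  (PySem.List.enumerate cs 0).foldl
    (fun d p => if d.contains p.2 then d.modify p.2 [] (· ++ [p.1]) else d)
    (PySem.Dict.ofList (pvREQ.map (fun kv => (kv.1, ([] : List Int)))))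

def programmerStrings_alt (s : String) : Int :=
  let pos := pvBuildPos s.toList
  if pvREQ.any (fun kv => decide ((((pos.getD kv.1 []).length : Int)) < kv.2)) then -1
  else
    let e1 := (PySem.List.max?
      (pvREQ.map (fun kv => PySem.List.pyGetD (pos.getD kv.1 []) (kv.2 - 1) 0))
      (fun v => v)).getD 0
    let s2 := (PySem.List.min?
      (pvREQ.map (fun kv =>
        PySem.List.pyGetD (pos.getD kv.1 []) (((pos.getD kv.1 []).length : Int) - kv.2) 0))
      (fun v => v)).getD 0
    s2 - e1 - 1

-- ===== PRECONDITION & SPEC =====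
def Spec_programmerStrings (s : String) (out : Int) : Prop := out = programmerStrings_alt s
instance (s : String) (out : Int) : Decidable (Spec_programmerStrings s out) := by unfold Spec_programmerStrings; infer_instance

-- ===== CLAIM (what is proved, stated in full; the proofs are below) =====
def Claim_equal_programmerStrings : Prop := ∀ (s : String), Dom_programmerStrings s → Spec_programmerStrings s (programmerStrings s)

-- ===== LEMMAS AND PROOFS =====

-- 'the list l contains every required letter with its multiplicity'
def covB (l : List Char) : Bool :=
  pvREQ.all (fun kv => decide (kv.2 ≤ (l.count kv.1 : Int)))

-- positions (0-based) of the occurrences of c in a list, in order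
def occN (c : Char) : List Char → List Nat
  | [] => []
  | x :: r => if x = c then 0 :: (occN c r).map (· + 1) else (occN c r).map (· + 1)

-- abstract form of A's first loop: scan rest, done already consumed and not yet covering
def scanF : List Char → List Char → Option Nat
  | _, [] => none
  | done, c :: r => if covB (done ++ [c]) then some done.length else scanF (done ++ [c]) r

-- abstract form of A's second loop: positions m-1, …, 0 still to visit
def scanR (cs : List Char) : Nat → Option Nat
  | 0 => none
  | m + 1 => if covB (cs.drop m) then some m else scanR cs m

lemma PG_items : pvPG.items = pvREQ := by decide

lemma req_contains (kv : Char × Int) (h : kv ∈ pvREQ) : pvPG.contains kv.1 = true := by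
  fin_cases h <;> decide

lemma covers_eq (c2 : PySem.Dict Char Int) (l : List Char)
    (h : ∀ kv ∈ pvREQ, c2.getD kv.1 0 = (l.count kv.1 : Int)) :
    pvCovers c2 = covB l := by
  unfold pvCovers covB
  rw [PG_items, Bool.eq_iff_iff]
  simp only [List.all_eq_true, decide_eq_true_eq]
  constructor <;> intro hall kv hkv
  · rw [← h kv hkv]; exact hall kv hkv
  · rw [h kv hkv]; exact hall kv hkv

lemma covB_congr (l l' : List Char) (h : ∀ kv ∈ pvREQ, l.count kv.1 = l'.count kv.1) :
    covB l = covB l' := by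
  unfold covB
  rw [Bool.eq_iff_iff]
  simp only [List.all_eq_true, decide_eq_true_eq]
  constructor <;> intro hall kv hkv
  · rw [← h kv hkv]; exact hall kv hkv
  · rw [h kv hkv]; exact hall kv hkv

lemma covB_mono (l t : List Char) (h : covB l = true) : covB (l ++ t) = true := by
  unfold covB at h ⊢
  simp only [List.all_eq_true, decide_eq_true_eq, List.count_append] at h ⊢
  intro kv hkv
  have := h kv hkv
  push_cast
  omega

lemma covB_mono_l (l t : List Char) (h : covB t = true) : covB (l ++ t) = true := by
  unfold covB at h ⊢
  simp only [List.all_eq_true, decide_eq_true_eq, List.count_append] at h ⊢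
  intro kv hkv
  have := h kv hkv
  push_cast
  omega

lemma loopF_eq (rest : List Char) : ∀ (done : List Char) (c2 : PySem.Dict Char Int) (e1 : Int),
    (∀ kv ∈ pvREQ, c2.getD kv.1 0 = (done.count kv.1 : Int)) →
    covB done = false →
    pvLoopF (PySem.List.enumerate rest (done.length : Int)) c2 e1 =
      (match scanF done rest with
       | some m => (m : Int)
       | none => e1) := by
  induction rest with
  | nil => intro done c2 e1 h hcv; simp [scanF, PySem.List.enumerate_nil, pvLoopF]
  | cons c r ih =>
    intro done c2 e1 h hcv
    rw [PySem.List.enumerate_cons]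
    simp only [pvLoopF]
    have hlen : ((done.length : Int) + 1) = (((done ++ [c]).length : Nat) : Int) := by
      simp
    by_cases hc : pvPG.contains c = true
    · rw [if_neg (by simp [hc])]
      have hinv' : ∀ kv ∈ pvREQ, (c2.modify c 0 (· + 1)).getD kv.1 0 = (((done ++ [c]).count kv.1 : Nat) : Int) := by
        intro kv hkv
        rw [PySem.Dict.getD_modify]
        by_cases hkc : kv.1 = c
        · rw [if_pos hkc, hkc]
          have := h kv hkv
          rw [hkc] at this
          rw [this]
          simp [List.count_append]
        · rw [if_neg hkc, h kv hkv]
          simp [List.count_append, Ne.symm hkc]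
      rw [covers_eq _ (done ++ [c]) hinv']
      simp only [scanF]
      by_cases hcov : covB (done ++ [c]) = true
      · rw [if_pos hcov, if_pos hcov]
      · have hcov' : covB (done ++ [c]) = false := by
          revert hcov; cases covB (done ++ [c]) <;> simp
        rw [if_neg (by simp [hcov']), if_neg (by simp [hcov'])]
        have := ih (done ++ [c]) (c2.modify c 0 (· + 1)) e1 hinv' hcov'
        rw [hlen]
        exact this
    · have hcf : pvPG.contains c = false := by
        revert hc; cases pvPG.contains c <;> simp
      rw [if_pos hcf]
      have hcnt : ∀ kv ∈ pvREQ, (done ++ [c]).count kv.1 = done.count kv.1 := by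
        intro kv hkv
        have hne : kv.1 ≠ c := by
          intro he
          have := req_contains kv hkv
          rw [he, hcf] at this
          exact absurd this (by simp)
        simp [List.count_append, Ne.symm hne]
      have hcov' : covB (done ++ [c]) = false := by
        rw [covB_congr _ done hcnt]; exact hcv
      have hinv' : ∀ kv ∈ pvREQ, c2.getD kv.1 0 = (((done ++ [c]).count kv.1 : Nat) : Int) := by
        intro kv hkv
        rw [hcnt kv hkv]
        exact h kv hkv
      simp only [scanF]
      rw [if_neg (by simp [hcov'])]
      have := ih (done ++ [c]) c2 e1 hinv' hcov'
      rw [hlen]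
      exact this

lemma loopB_eq (cs : List Char) : ∀ (m : Nat) (c2 : PySem.Dict Char Int) (s2 : Int),
    m ≤ cs.length →
    (∀ kv ∈ pvREQ, c2.getD kv.1 0 = ((cs.drop m).count kv.1 : Int)) →
    covB (cs.drop m) = false →
    pvLoopB cs (PySem.List.pyRange ((m : Int) - 1) (-1) (-1)) c2 s2 =
      (match scanR cs m with
       | some j => (j : Int)
       | none => s2) := by
  intro m
  induction m with
  | zero =>
    intro c2 s2 _ _ _
    rw [show ((0 : Nat) : Int) - 1 = -1 by norm_num,
      PySem.List.pyRange_neg_one_eq_nil (by norm_num)]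
    simp [pvLoopB, scanR]
  | succ m ih =>
    intro c2 s2 hm h hcv
    have hmlt : m < cs.length := by omega
    rw [show (((m + 1 : Nat)) : Int) - 1 = ((m : Nat) : Int) by push_cast; omega,
      PySem.List.pyRange_neg_one_cons (by omega)]
    simp only [pvLoopB]
    rw [PySem.List.pyGet?_natCast, List.getElem?_eq_getElem hmlt]
    have hdrop : cs.drop m = cs[m] :: cs.drop (m + 1) := List.drop_eq_getElem_cons hmlt
    simp only [scanR]
    by_cases hc : pvPG.contains cs[m] = true
    · rw [if_neg (by simp [hc])]
      have hinv' : ∀ kv ∈ pvREQ, (c2.modify cs[m] 0 (· + 1)).getD kv.1 0 = (((cs.drop m).count kv.1 : Nat) : Int) := by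
        intro kv hkv
        rw [PySem.Dict.getD_modify]
        by_cases hkc : kv.1 = cs[m]
        · rw [if_pos hkc, hkc]
          have := h kv hkv
          rw [hkc] at this
          rw [this, hdrop, List.count_cons]
          simp only [BEq.rfl, if_true]
          push_cast
          ring
        · have hbe : (cs[m] == kv.1) = false := by simp; exact fun he => hkc he.symm
          rw [if_neg hkc, h kv hkv, hdrop, List.count_cons, hbe]
          simp
      rw [covers_eq _ (cs.drop m) hinv']
      by_cases hcov : covB (cs.drop m) = true
      · rw [if_pos hcov, if_pos hcov]
      · have hcov' : covB (cs.drop m) = false := by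
          revert hcov; cases covB (cs.drop m) <;> simp
        rw [if_neg (by simp [hcov']), if_neg (by simp [hcov'])]
        exact ih (c2.modify cs[m] 0 (· + 1)) s2 (by omega) hinv' hcov'
    · have hcf : pvPG.contains cs[m] = false := by
        revert hc; cases pvPG.contains cs[m] <;> simp
      rw [if_pos hcf]
      have hcnt : ∀ kv ∈ pvREQ, (cs.drop m).count kv.1 = (cs.drop (m + 1)).count kv.1 := by
        intro kv hkv
        have hne : kv.1 ≠ cs[m] := by
          intro he
          have := req_contains kv hkv
          rw [he, hcf] at this
          exact absurd this (by simp)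
        have hbe : (cs[m] == kv.1) = false := by simp; exact fun he => hne he.symm
        rw [hdrop, List.count_cons, hbe]
        simp
      have hcov' : covB (cs.drop m) = false := by
        rw [covB_congr _ (cs.drop (m + 1)) hcnt]; exact hcv
      rw [if_neg (by simp [hcov'])]
      have hinv' : ∀ kv ∈ pvREQ, c2.getD kv.1 0 = (((cs.drop m).count kv.1 : Nat) : Int) := by
        intro kv hkv
        rw [hcnt kv hkv]
        exact h kv hkv
      exact ih c2 s2 (by omega) hinv' hcov'

lemma scanF_none (done rest : List Char) (h0 : covB done = false) :
    scanF done rest = none ↔ covB (done ++ rest) = false := by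
  induction rest generalizing done with
  | nil => simp [scanF, h0]
  | cons c r ih =>
    simp only [scanF]
    by_cases hc : covB (done ++ [c]) = true
    · have hall : covB (done ++ c :: r) = true := by
        have := covB_mono (done ++ [c]) r hc
        simpa using this
      simp [hc, hall]
    · have hc' : covB (done ++ [c]) = false := by
        revert hc; cases covB (done ++ [c]) <;> simp
      rw [if_neg (by simp [hc'])]
      have := ih (done ++ [c]) hc'
      simpa using this

lemma scanF_some (done rest : List Char) (m : Nat) (h0 : covB done = false)
    (h : scanF done rest = some m) :
    covB ((done ++ rest).take (m + 1)) = true ∧ covB ((done ++ rest).take m) = false := by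
  induction rest generalizing done m with
  | nil => simp [scanF] at h
  | cons c r ih =>
    simp only [scanF] at h
    by_cases hc : covB (done ++ [c]) = true
    · rw [if_pos hc] at h
      obtain rfl : done.length = m := by injection h
      refine ⟨?_, ?_⟩
      · have heq : (done ++ c :: r).take (done.length + 1) = done ++ [c] := by
          rw [show done ++ c :: r = (done ++ [c]) ++ r by simp]
          rw [List.take_left' (by simp)]
        rw [heq]; exact hc
      · rw [List.take_left' rfl]; exact h0
    · have hc' : covB (done ++ [c]) = false := by
        revert hc; cases covB (done ++ [c]) <;> simp
      rw [if_neg (by simp [hc'])] at h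
      have := ih (done ++ [c]) m hc' h
      simpa using this

lemma scanR_none (cs : List Char) (m : Nat) :
    scanR cs m = none ↔ ∀ j < m, covB (cs.drop j) = false := by
  induction m with
  | zero => simp [scanR]
  | succ m ih =>
    simp only [scanR]
    by_cases hc : covB (cs.drop m) = true
    · simp only [if_pos hc]
      constructor
      · intro h; exact absurd h (by simp)
      · intro h; rw [h m (by omega)] at hc; exact absurd hc (by simp)
    · have hc' : covB (cs.drop m) = false := by
        revert hc; cases covB (cs.drop m) <;> simp
      rw [if_neg (by simp [hc'])]
      rw [ih]
      constructor
      · intro h j hj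
        rcases Nat.lt_succ_iff_lt_or_eq.mp hj with hj' | rfl
        · exact h j hj'
        · exact hc'
      · intro h j hj; exact h j (by omega)

lemma scanR_some (cs : List Char) : ∀ (m : Nat) (j : Nat), covB (cs.drop m) = false →
    scanR cs m = some j →
    covB (cs.drop j) = true ∧ covB (cs.drop (j + 1)) = false := by
  intro m
  induction m with
  | zero => intro j _ h; simp [scanR] at h
  | succ m ih =>
    intro j hm h
    simp only [scanR] at h
    by_cases hc : covB (cs.drop m) = true
    · rw [if_pos hc] at h
      obtain rfl : m = j := by injection h
      exact ⟨hc, hm⟩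
    · have hc' : covB (cs.drop m) = false := by
        revert hc; cases covB (cs.drop m) <;> simp
      rw [if_neg (by simp [hc'])] at h
      exact ih j hc' h

lemma occN_length (c : Char) (cs : List Char) : (occN c cs).length = cs.count c := by
  induction cs with
  | nil => simp [occN]
  | cons x r ih =>
    by_cases hx : x = c <;> simp [occN, hx, ih]

lemma occN_lt_iff (c : Char) (cs : List Char) : ∀ (k n : Nat) (hk : k < (occN c cs).length),
    ((occN c cs)[k] < n ↔ k < (cs.take n).count c) := by
  induction cs with
  | nil => intro k n hk; simp [occN] at hk
  | cons x r ih =>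
    intro k n hk
    by_cases hx : x = c
    · subst hx
      cases k with
      | zero =>
        cases n with
        | zero => simp [occN]
        | succ n => simp [occN]
      | succ k =>
        have hk' : k < (occN x r).length := by simpa [occN] using hk
        cases n with
        | zero =>
          simp only [List.take_zero, List.count_nil]
          omega
        | succ n =>
          have hind := ih k n hk'
          simp only [occN, List.getElem_cons_succ, List.getElem_map,
            List.take_succ_cons, List.count_cons, BEq.rfl, if_true]
          omega
    · have hk' : k < (occN c r).length := by simpa [occN, hx] using hk
      cases n with
      | zero =>
        simp only [List.take_zero, List.count_nil]
        omega
      | succ n =>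
        have hind := ih k n hk'
        have hbe : (x == c) = false := by simp [hx]
        simp only [occN, if_neg hx, List.getElem_map, List.take_succ_cons,
          List.count_cons, hbe, Bool.false_eq_true, if_false]
        omega

lemma map_shift (l : List Nat) (s : Int) :
    (l.map (· + 1)).map (fun j : Nat => s + (j : Int)) = l.map (fun j : Nat => (s + 1) + (j : Int)) := by
  induction l with
  | nil => rfl
  | cons a t ih =>
    simp only [List.map_cons, ih, List.cons.injEq]
    exact ⟨by push_cast; ring, trivial⟩

lemma buildPos_getD (cs : List Char) :
    ∀ (d : PySem.Dict Char (List Int)) (s : Int) (c : Char), d.contains c = true →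
    ((PySem.List.enumerate cs s).foldl
        (fun d p => if d.contains p.2 then d.modify p.2 [] (· ++ [p.1]) else d) d).getD c []
      = d.getD c [] ++ (occN c cs).map (fun j : Nat => s + (j : Int)) := by
  induction cs with
  | nil => intro d s c hc; simp [occN, PySem.List.enumerate_nil]
  | cons x r ih =>
    intro d s c hc
    rw [PySem.List.enumerate_cons]
    simp only [List.foldl_cons]
    by_cases hdx : d.contains x = true
    · rw [if_pos hdx]
      have hc' : (d.modify x [] (· ++ [s])).contains c = true := by
        rw [PySem.Dict.contains_modify]; simp [hc]
      rw [ih (d.modify x [] (· ++ [s])) (s + 1) c hc']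
      by_cases hxc : x = c
      · subst hxc
        rw [PySem.Dict.getD_modify_self]
        have hocc : occN x (x :: r) = 0 :: (occN x r).map (· + 1) := by simp [occN]
        rw [hocc, List.map_cons, map_shift, List.append_assoc]
        simp
      · rw [PySem.Dict.getD_modify_of_ne _ _ _ (fun he => hxc he.symm)]
        have hocc : occN c (x :: r) = (occN c r).map (· + 1) := by simp [occN, hxc]
        rw [hocc, map_shift]
    · rw [if_neg hdx]
      have hxc : x ≠ c := fun he => hdx (he ▸ hc)
      rw [ih d (s + 1) c hc]
      have hocc : occN c (x :: r) = (occN c r).map (· + 1) := by simp [occN, hxc]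
      rw [hocc, map_shift]

lemma pos_getD (cs : List Char) (kv : Char × Int) (h : kv ∈ pvREQ) :
    (pvBuildPos cs).getD kv.1 [] = (occN kv.1 cs).map (fun j : Nat => (j : Int)) := by
  unfold pvBuildPos
  have hcont : (PySem.Dict.ofList (pvREQ.map (fun kv => (kv.1, ([] : List Int))))).contains kv.1 = true := by
    fin_cases h <;> decide
  rw [buildPos_getD cs _ 0 kv.1 hcont]
  have hinit : (PySem.Dict.ofList (pvREQ.map (fun kv => (kv.1, ([] : List Int))))).getD kv.1 [] = [] := by
    fin_cases h <;> decide
  rw [hinit]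
  simp

lemma covB_nil : covB [] = false := by decide

lemma req_pos : ∀ kv ∈ pvREQ, 1 ≤ kv.2 := by decide

lemma covB_iff (l : List Char) :
    covB l = true ↔ ∀ kv ∈ pvREQ, kv.2 ≤ (l.count kv.1 : Int) := by
  unfold covB
  simp [List.all_eq_true]

lemma covB_false_iff (l : List Char) :
    covB l = false ↔ ∃ kv ∈ pvREQ, (l.count kv.1 : Int) < kv.2 := by
  rw [show (covB l = false) ↔ ¬ (covB l = true) by cases covB l <;> simp]
  rw [covB_iff]
  push Not
  constructor
  · rintro ⟨kv, hkv, hlt⟩; exact ⟨kv, hkv, hlt⟩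
  · rintro ⟨kv, hkv, hlt⟩; exact ⟨kv, hkv, hlt⟩

lemma posLen_eq (cs : List Char) (kv : Char × Int) (h : kv ∈ pvREQ) :
    (((pvBuildPos cs).getD kv.1 []).length : Int) = (cs.count kv.1 : Int) := by
  rw [pos_getD cs kv h]
  simp [occN_length]

lemma guard_iff (cs : List Char) :
    (pvREQ.any (fun kv => decide ((((pvBuildPos cs).getD kv.1 []).length : Int) < kv.2)) = true)
      ↔ covB cs = false := by
  rw [covB_false_iff]
  simp only [List.any_eq_true, decide_eq_true_eq]
  constructor
  · rintro ⟨kv, hkv, hlt⟩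
    refine ⟨kv, hkv, ?_⟩
    rw [posLen_eq cs kv hkv] at hlt
    exact hlt
  · rintro ⟨kv, hkv, hlt⟩
    refine ⟨kv, hkv, ?_⟩
    rw [posLen_eq cs kv hkv]
    exact hlt

lemma val1_spec (cs : List Char) (kv : Char × Int) (h : kv ∈ pvREQ)
    (hcov : covB cs = true) (n : Nat) :
    (PySem.List.pyGetD ((pvBuildPos cs).getD kv.1 []) (kv.2 - 1) 0 < (n : Int))
      ↔ kv.2 ≤ ((cs.take n).count kv.1 : Int) := by
  have h1 := req_pos kv h
  have hcnt : kv.2 ≤ (cs.count kv.1 : Int) := (covB_iff cs).mp hcov kv h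
  rw [pos_getD cs kv h]
  have hlenm : ((occN kv.1 cs).map (fun j : Nat => (j : Int))).length = cs.count kv.1 := by
    simp [occN_length]
  have h0 : (0 : Int) ≤ kv.2 - 1 := by omega
  have hlt : kv.2 - 1 < ((((occN kv.1 cs).map (fun j : Nat => (j : Int))).length : Nat) : Int) := by
    rw [hlenm]; omega
  rw [PySem.List.pyGetD_eq_getElem _ 0 h0 hlt]
  have hkidx : (kv.2 - 1).toNat < (occN kv.1 cs).length := by rw [occN_length]; omega
  rw [List.getElem_map]
  have hiff := occN_lt_iff kv.1 cs (kv.2 - 1).toNat n hkidx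
  constructor
  · intro hlt2
    have hnn : (occN kv.1 cs)[(kv.2 - 1).toNat] < n := by exact_mod_cast hlt2
    have := hiff.mp hnn
    omega
  · intro hge
    have hnn : (kv.2 - 1).toNat < (cs.take n).count kv.1 := by omega
    have := hiff.mpr hnn
    exact_mod_cast this

lemma val2_spec (cs : List Char) (kv : Char × Int) (h : kv ∈ pvREQ)
    (hcov : covB cs = true) (n : Nat) :
    ((n : Int) ≤ PySem.List.pyGetD ((pvBuildPos cs).getD kv.1 [])
        ((((pvBuildPos cs).getD kv.1 []).length : Int) - kv.2) 0)
      ↔ kv.2 ≤ ((cs.drop n).count kv.1 : Int) := by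
  have h1 := req_pos kv h
  have hcnt : kv.2 ≤ (cs.count kv.1 : Int) := (covB_iff cs).mp hcov kv h
  have htd : (cs.take n).count kv.1 + (cs.drop n).count kv.1 = cs.count kv.1 := by
    rw [← List.count_append, List.take_append_drop]
  rw [posLen_eq cs kv h, pos_getD cs kv h]
  have hlenm : ((occN kv.1 cs).map (fun j : Nat => (j : Int))).length = cs.count kv.1 := by
    simp [occN_length]
  have h0 : (0 : Int) ≤ (cs.count kv.1 : Int) - kv.2 := by omega
  have hlt : (cs.count kv.1 : Int) - kv.2 < ((((occN kv.1 cs).map (fun j : Nat => (j : Int))).length : Nat) : Int) := by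
    rw [hlenm]; omega
  rw [PySem.List.pyGetD_eq_getElem _ 0 h0 hlt]
  have hkidx : ((cs.count kv.1 : Int) - kv.2).toNat < (occN kv.1 cs).length := by
    rw [occN_length]; omega
  rw [List.getElem_map]
  have hiff := occN_lt_iff kv.1 cs ((cs.count kv.1 : Int) - kv.2).toNat n hkidx
  have hctk : (cs.take n).count kv.1 ≤ cs.count kv.1 := by omega
  constructor
  · intro hge
    by_contra hno
    have hlt2 : (cs.drop n).count kv.1 < kv.2.toNat := by omega
    have htkn : ((cs.count kv.1 : Int) - kv.2).toNat < (cs.take n).count kv.1 := by omega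
    have := hiff.mpr htkn
    have : ((occN kv.1 cs)[((cs.count kv.1 : Int) - kv.2).toNat] : Int) < (n : Int) := by
      exact_mod_cast this
    omega
  · intro hge
    by_contra hno
    have hlt2 : ((occN kv.1 cs)[((cs.count kv.1 : Int) - kv.2).toNat] : Int) < (n : Int) := by omega
    have hnn : (occN kv.1 cs)[((cs.count kv.1 : Int) - kv.2).toNat] < n := by exact_mod_cast hlt2
    have := hiff.mp hnn
    omega

lemma loopF_top (cs : List Char) :
    pvLoopF (PySem.List.enumerate cs 0) PySem.Dict.empty 0 =
      (match scanF [] cs with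
       | some m => (m : Int)
       | none => 0) := by
  have h := loopF_eq cs [] PySem.Dict.empty 0
    (by intro kv _; simp [PySem.Dict.getD_empty]) covB_nil
  simpa using h

lemma loopB_top (cs : List Char) :
    pvLoopB cs (PySem.List.pyRange ((cs.length : Int) - 1) (-1) (-1)) PySem.Dict.empty 0 =
      (match scanR cs cs.length with
       | some j => (j : Int)
       | none => 0) := by
  have h := loopB_eq cs cs.length PySem.Dict.empty 0 (le_refl _)
    (by intro kv _; simp [PySem.Dict.getD_empty, List.drop_length])
    (by rw [List.drop_length]; exact covB_nil)
  simpa using h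

-- ===== VERDICT (by name: the statement is the Claim_ definition above) =====
theorem programmerStrings_spec : Claim_equal_programmerStrings := by
  intro s _
  unfold Spec_programmerStrings programmerStrings programmerStrings_alt
  set cs := s.toList with hcs
  simp only []
  rw [loopF_top cs, loopB_top cs]
  by_cases hcov : covB cs = true
  · -- the guard is false
    rw [if_neg (by rw [guard_iff cs]; simp [hcov])]
    -- forward index
    obtain ⟨m, hsf⟩ : ∃ m, scanF [] cs = some m := by
      cases hsf : scanF [] cs with
      | none =>
        rw [scanF_none [] cs covB_nil] at hsf
        simp only [List.nil_append] at hsf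
        rw [hcov] at hsf
        exact absurd hsf (by simp)
      | some m => exact ⟨m, rfl⟩
    obtain ⟨covT, covF⟩ := scanF_some [] cs m covB_nil hsf
    simp only [List.nil_append] at covT covF
    -- backward index
    have hne : cs ≠ [] := by
      intro hnil
      rw [hnil, covB_nil] at hcov
      exact absurd hcov (by simp)
    have hpos : 0 < cs.length := List.length_pos_of_ne_nil hne
    obtain ⟨j, hsr⟩ : ∃ j, scanR cs cs.length = some j := by
      cases hsr : scanR cs cs.length with
      | none =>
        have h0 := (scanR_none cs cs.length).mp hsr 0 (by omega)
        rw [List.drop_zero, hcov] at h0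
        exact absurd h0 (by simp)
      | some j => exact ⟨j, rfl⟩
    obtain ⟨covDj, covDj1⟩ := scanR_some cs cs.length j
      (by rw [List.drop_length]; exact covB_nil) hsr
    rw [hsf, hsr]
    -- B's max equals m
    have hmax :
        (PySem.List.max? (pvREQ.map (fun kv =>
          PySem.List.pyGetD ((pvBuildPos cs).getD kv.1 []) (kv.2 - 1) 0)) (fun v => v)).getD 0
          = (m : Int) := by
      cases hmx : PySem.List.max? (pvREQ.map (fun kv =>
          PySem.List.pyGetD ((pvBuildPos cs).getD kv.1 []) (kv.2 - 1) 0)) (fun v => v) with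
      | none =>
        rw [PySem.List.max?_eq_none_iff] at hmx
        simp [pvREQ] at hmx
      | some x =>
        have hxmem := PySem.List.max?_mem hmx
        have hxub := PySem.List.max?_isMax hmx
        have hub : ∀ v ∈ pvREQ.map (fun kv =>
            PySem.List.pyGetD ((pvBuildPos cs).getD kv.1 []) (kv.2 - 1) 0), v ≤ (m : Int) := by
          intro v hv
          obtain ⟨kv, hkv, rfl⟩ := List.mem_map.mp hv
          have := (val1_spec cs kv hkv hcov (m + 1)).mpr ((covB_iff _).mp covT kv hkv)
          push_cast at this
          omega
        obtain ⟨kv0, hkv0, hlt0⟩ := (covB_false_iff _).mp covF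
        have hlb : (m : Int) ≤ PySem.List.pyGetD ((pvBuildPos cs).getD kv0.1 []) (kv0.2 - 1) 0 := by
          have hnot := (val1_spec cs kv0 hkv0 hcov m).not.mpr (by omega)
          omega
        have hxm : x ≤ (m : Int) := hub x hxmem
        have hmem0 : PySem.List.pyGetD ((pvBuildPos cs).getD kv0.1 []) (kv0.2 - 1) 0
            ∈ pvREQ.map (fun kv => PySem.List.pyGetD ((pvBuildPos cs).getD kv.1 []) (kv.2 - 1) 0) :=
          List.mem_map_of_mem hkv0
        have := hxub _ hmem0
        simp only [Option.getD_some]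
        omega
    -- B's min equals j
    have hmin :
        (PySem.List.min? (pvREQ.map (fun kv =>
          PySem.List.pyGetD ((pvBuildPos cs).getD kv.1 [])
            ((((pvBuildPos cs).getD kv.1 []).length : Int) - kv.2) 0)) (fun v => v)).getD 0
          = (j : Int) := by
      cases hmx : PySem.List.min? (pvREQ.map (fun kv =>
          PySem.List.pyGetD ((pvBuildPos cs).getD kv.1 [])
            ((((pvBuildPos cs).getD kv.1 []).length : Int) - kv.2) 0)) (fun v => v) with
      | none =>
        rw [PySem.List.min?_eq_none_iff] at hmx
        simp [pvREQ] at hmx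
      | some x =>
        have hxmem := PySem.List.min?_mem hmx
        have hxlb := PySem.List.min?_isMin hmx
        have hlb : ∀ v ∈ pvREQ.map (fun kv =>
            PySem.List.pyGetD ((pvBuildPos cs).getD kv.1 [])
              ((((pvBuildPos cs).getD kv.1 []).length : Int) - kv.2) 0), (j : Int) ≤ v := by
          intro v hv
          obtain ⟨kv, hkv, rfl⟩ := List.mem_map.mp hv
          exact (val2_spec cs kv hkv hcov j).mpr ((covB_iff _).mp covDj kv hkv)
        obtain ⟨kv0, hkv0, hlt0⟩ := (covB_false_iff _).mp covDj1
        have hub : PySem.List.pyGetD ((pvBuildPos cs).getD kv0.1 [])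
            ((((pvBuildPos cs).getD kv0.1 []).length : Int) - kv0.2) 0 ≤ (j : Int) := by
          have hnot := (val2_spec cs kv0 hkv0 hcov (j + 1)).not.mpr (by omega)
          push_cast at hnot
          omega
        have hxj : (j : Int) ≤ x := hlb x hxmem
        have hmem0 : PySem.List.pyGetD ((pvBuildPos cs).getD kv0.1 [])
            ((((pvBuildPos cs).getD kv0.1 []).length : Int) - kv0.2) 0
            ∈ pvREQ.map (fun kv => PySem.List.pyGetD ((pvBuildPos cs).getD kv.1 [])
              ((((pvBuildPos cs).getD kv.1 []).length : Int) - kv.2) 0) :=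
          List.mem_map_of_mem hkv0
        have := hxlb _ hmem0
        simp only [Option.getD_some]
        omega
    rw [hmax, hmin]
  · -- not coverable: A returns 0 - 0 - 1, B returns -1
    have hcov' : covB cs = false := by
      revert hcov; cases covB cs <;> simp
    rw [if_pos (by rw [guard_iff cs]; exact hcov')]
    have hsf : scanF [] cs = none := by
      rw [scanF_none [] cs covB_nil]
      simpa using hcov'
    have hsr : scanR cs cs.length = none := by
      rw [scanR_none]
      intro k _
      by_contra hk
      have hk' : covB (cs.drop k) = true := by
        revert hk; cases covB (cs.drop k) <;> simp
      have := covB_mono_l (cs.take k) (cs.drop k) hk'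
      rw [List.take_append_drop] at this
      rw [this] at hcov'
      exact absurd hcov' (by simp)
    rw [hsf, hsr]
    norm_num
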